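-- pv_equiv track=rewrite | github.com/noino0819/oni_care_admin | backend/app/utils/sql_loader.py | parse_sql_file
-- ===== SOURCE A (Python) =====
-- from typing import Dict
--
-- def parse_sql_file(content: str) -> Dict[str, str]:
--     """
--     SQL 파일 파싱
--
--     Args:
--         content: SQL 파일 내용
--
--     Returns:
--         {쿼리명: SQL문} 딕셔너리
--     """
--     queries = {}
--     current_name = None
--     current_sql = []
--
--     for line in content.split('\n'):
--         stripped = line.strip()
--
--         # 쿼리 이름 주석 확인
--         if stripped.startswith('-- query_name:'):
--             # 이전 쿼리 저장
--             if current_name and current_sql: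
--                 queries[current_name] = '\n'.join(current_sql).strip()
--
--             # 새 쿼리 시작
--             current_name = stripped.replace('-- query_name:', '').strip()
--             current_sql = []
--         elif current_name is not None:
--             # 쿼리 내용 추가
--             current_sql.append(line)
--
--     # 마지막 쿼리 저장
--     if current_name and current_sql:
--         queries[current_name] = '\n'.join(current_sql).strip()
--
--     return queries
-- ===== SOURCE B (Python) =====
-- def parse_sql_file(content):
--     """Section-based parser: skip the prefix before the first marker, then
--     repeatedly take one marker line plus the run of lines up to the next marker."""
--     def is_marker(line):
--         return line.strip().startswith('-- query_name:')
--
--     lines = content.split('\n')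
--     n = len(lines)
--     queries = {}
--     i = 0
--     while i < n and not is_marker(lines[i]):
--         i += 1
--     while i < n:
--         name = lines[i].strip().replace('-- query_name:', '').strip()
--         j = i + 1
--         while j < n and not is_marker(lines[j]):
--             j += 1
--         body = lines[i + 1:j]
--         if name and body:
--             queries[name] = '\n'.join(body).strip()
--         i = j
--     return queries
-- ===== Notes on version B (the rewrite author's own statement) =====
-- stated objective: alternative
-- what changed: Replaces A's single-pass state machine (current_name/current_sql accumulators mutated per line) by a section scanner: skip the prefix before the first marker, then repeatedly take a marker line and slice out the run of body lines up to the next marker.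
import Mathlib
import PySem

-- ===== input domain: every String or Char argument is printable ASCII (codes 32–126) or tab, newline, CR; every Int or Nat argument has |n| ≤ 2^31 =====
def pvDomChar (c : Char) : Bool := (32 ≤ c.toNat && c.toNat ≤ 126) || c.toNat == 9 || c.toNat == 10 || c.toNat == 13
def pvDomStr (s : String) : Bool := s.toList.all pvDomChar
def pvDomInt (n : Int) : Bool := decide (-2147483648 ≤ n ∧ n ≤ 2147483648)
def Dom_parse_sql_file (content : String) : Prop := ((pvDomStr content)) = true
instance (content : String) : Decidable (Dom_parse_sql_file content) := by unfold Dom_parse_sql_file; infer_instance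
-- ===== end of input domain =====

-- B replaces A's per-line state machine by a section scanner (skip prefix, then marker + body-run per section); alternative decomposition, same cost.

-- ===== PORT A =====
def pvStepA (st : PySem.Dict String String × Option String × List String) (line : String) :
    PySem.Dict String String × Option String × List String :=
  let stripped := PySem.Str.strip line
  if PySem.Str.startswith stripped "-- query_name:" then
    let queries' :=
      match st.2.1 with
      | some nm =>
          if nm ≠ "" ∧ st.2.2 ≠ [] then
            st.1.insert nm (PySem.Str.strip (PySem.Str.join "\n" st.2.2))
          else st.1
      | none => st.1
    (queries', some (PySem.Str.strip (PySem.Str.replace stripped "-- query_name:" "")), [])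
  else
    match st.2.1 with
    | some _ => (st.1, st.2.1, st.2.2 ++ [line])
    | none => st

def parse_sql_file (content : String) : List (String × String) :=
  let st := (((PySem.Str.split? content "\n").getD [])).foldl pvStepA (PySem.Dict.empty, none, [])
  (match st with
   | (queries, some nm, sql) =>
       if nm ≠ "" ∧ sql ≠ [] then
         queries.insert nm (PySem.Str.strip (PySem.Str.join "\n" sql))
       else queries
   | (queries, none, _) => queries).items

-- ===== PORT B =====
def pvIsMarker (line : String) : Bool :=
  PySem.Str.startswith (PySem.Str.strip line) "-- query_name:"

def pvHeaderName (line : String) : String :=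
  PySem.Str.strip (PySem.Str.replace (PySem.Str.strip line) "-- query_name:" "")

-- the outer while loop of Source B: one section (marker header + body run) per step
def pvGoB (lines : List String) (queries : PySem.Dict String String) : PySem.Dict String String :=
  match lines with
  | [] => queries
  | header :: rest =>
    let body := rest.takeWhile (fun l => !pvIsMarker l)
    let rest' := rest.dropWhile (fun l => !pvIsMarker l)
    let name := pvHeaderName header
    pvGoB rest'
      (if name ≠ "" ∧ body ≠ [] then
        queries.insert name (PySem.Str.strip (PySem.Str.join "\n" body))
      else queries)
termination_by lines.length
decreasing_by
  simp only [List.length_cons]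
  exact Nat.lt_succ_of_le (List.length_dropWhile_le _ _)

def parse_sql_file_alt (content : String) : List (String × String) :=
  let lines := ((PySem.Str.split? content "\n").getD [])
  (pvGoB (lines.dropWhile (fun l => !pvIsMarker l)) PySem.Dict.empty).items

-- ===== PRECONDITION & SPEC =====
def Spec_parse_sql_file (content : String) (out : List (String × String)) : Prop := out = parse_sql_file_alt content
instance (content : String) (out : List (String × String)) : Decidable (Spec_parse_sql_file content out) := by unfold Spec_parse_sql_file; infer_instance

-- ===== CLAIM (what is proved, stated in full; the proofs are below) =====
def Claim_equal_parse_sql_file : Prop := ∀ (content : String), Dom_parse_sql_file content → Spec_parse_sql_file content (parse_sql_file content)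

-- ===== LEMMAS AND PROOFS =====

def pvSaveIf (q : PySem.Dict String String) (nm : String) (body : List String) :
    PySem.Dict String String :=
  if nm ≠ "" ∧ body ≠ [] then q.insert nm (PySem.Str.strip (PySem.Str.join "\n" body)) else q

def pvFinish (st : PySem.Dict String String × Option String × List String) :
    PySem.Dict String String :=
  match st with
  | (queries, some nm, sql) => pvSaveIf queries nm sql
  | (queries, none, _) => queries

lemma pvGoB_cons (header : String) (rest : List String) (q : PySem.Dict String String) :
    pvGoB (header :: rest) q =
      pvGoB (rest.dropWhile (fun l => !pvIsMarker l))
        (pvSaveIf q (pvHeaderName header) (rest.takeWhile (fun l => !pvIsMarker l))) := by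
  rw [pvGoB]; rfl

lemma pvStepA_none_skip (q : PySem.Dict String String) (l : String)
    (h : pvIsMarker l = false) :
    pvStepA (q, none, []) l = (q, none, []) := by
  simp [pvStepA, pvIsMarker] at *
  simp [h]

lemma pvStepA_none_marker (q : PySem.Dict String String) (l : String)
    (h : pvIsMarker l = true) :
    pvStepA (q, none, []) l = (q, some (pvHeaderName l), []) := by
  simp [pvStepA, pvIsMarker, pvHeaderName] at *
  simp [h]

lemma pvStepA_some_skip (q : PySem.Dict String String) (nm l : String) (sql : List String)
    (h : pvIsMarker l = false) :
    pvStepA (q, some nm, sql) l = (q, some nm, sql ++ [l]) := by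
  simp [pvStepA, pvIsMarker] at *
  simp [h]

lemma pvStepA_some_marker (q : PySem.Dict String String) (nm l : String) (sql : List String)
    (h : pvIsMarker l = true) :
    pvStepA (q, some nm, sql) l = (pvSaveIf q nm sql, some (pvHeaderName l), []) := by
  simp [pvStepA, pvIsMarker, pvHeaderName, pvSaveIf] at *
  simp [h]

-- A's fold ignores lines while the state has no current name
lemma pvFoldA_none (lines : List String) (q : PySem.Dict String String) :
    List.foldl pvStepA (q, none, []) lines =
      List.foldl pvStepA (q, none, []) (lines.dropWhile (fun l => !pvIsMarker l)) := by
  induction lines with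
  | nil => rfl
  | cons l t ih =>
    by_cases h : pvIsMarker l = true
    · simp [h]
    · rw [Bool.not_eq_true] at h
      simp [h, List.foldl_cons, pvStepA_none_skip q l h, ih]

-- main invariant: finishing A's fold from an open section = B's section scanner
lemma pvFoldA_some (rest : List String) :
    ∀ (q : PySem.Dict String String) (nm : String) (sql : List String),
    pvFinish (List.foldl pvStepA (q, some nm, sql) rest) =
      pvGoB (rest.dropWhile (fun l => !pvIsMarker l))
        (pvSaveIf q nm (sql ++ rest.takeWhile (fun l => !pvIsMarker l))) := by
  induction rest with
  | nil => intro q nm sql; simp [pvFinish, pvGoB, pvSaveIf]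
  | cons l t ih =>
    intro q nm sql
    by_cases h : pvIsMarker l = true
    · rw [List.foldl_cons, pvStepA_some_marker q nm l sql h, ih]
      simp [h, pvGoB_cons]
    · rw [Bool.not_eq_true] at h
      rw [List.foldl_cons, pvStepA_some_skip q nm l sql h, ih]
      simp [h, List.append_assoc]

lemma pvParseA_eq_finish (content : String) :
    parse_sql_file content =
      (pvFinish (((PySem.Str.split? content "\n").getD []).foldl pvStepA
        (PySem.Dict.empty, none, []))).items := rfl

lemma pvParseB_eq_go (content : String) :
    parse_sql_file_alt content =
      (pvGoB (((PySem.Str.split? content "\n").getD []).dropWhile (fun l => !pvIsMarker l))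
        PySem.Dict.empty).items := rfl

lemma pvDropWhile_head_marker {p : String → Bool} :
    ∀ (l : List String) (m : String) (t : List String),
      l.dropWhile (fun x => !p x) = m :: t → p m = true := by
  intro l
  induction l with
  | nil => intro m t h; simp at h
  | cons a l ih =>
    intro m t h
    by_cases ha : p a = true
    · rw [List.dropWhile_cons_of_neg (by simp [ha])] at h
      exact (List.cons.injEq .. ▸ h).1 ▸ ha
    · rw [Bool.not_eq_true] at ha
      rw [List.dropWhile_cons_of_pos (by simp [ha])] at h
      exact ih m t h

-- ===== VERDICT (by name: the statement is the Claim_ definition above) =====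
theorem parse_sql_file_spec : Claim_equal_parse_sql_file := by
  intro content _
  unfold Spec_parse_sql_file
  rw [pvParseA_eq_finish, pvParseB_eq_go, pvFoldA_none]
  cases hd : ((PySem.Str.split? content "\n").getD []).dropWhile (fun l => !pvIsMarker l) with
  | nil => rw [pvGoB]; rfl
  | cons m t =>
    have hm : pvIsMarker m = true := pvDropWhile_head_marker _ m t hd
    rw [List.foldl_cons, pvStepA_none_marker _ m hm, pvFoldA_some, pvGoB_cons]
    simp
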